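-- pv_equiv track=rewrite | github.com/TiRoZh/Gomoku | final.py | check_diagonal_left
-- ===== SOURCE A (Python) =====
-- def check_diagonal_left(player,amount_check):
--     x_cord=0
--     y_cord=14
--     in_a_row=0
--     while x_cord<15:
--         if ((x_cord,y_cord) in player):
--             in_a_row+=1
--             if in_a_row==amount_check:
--                 return True
--         else:
--             in_a_row=0
--         x_cord+=1
--         y_cord-=1
--     return False
-- ===== SOURCE B (Python) =====
-- def check_diagonal_left(player, amount_check):
--     # Recursive sliding-window search: a window of amount_check cells starting
--     # at column s fits iff every cell in it is occupied; try s = 0, 1, ...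
--     def fits(x, y, k):
--         return k <= 0 or ((x, y) in player and fits(x + 1, y - 1, k - 1))
--
--     def search(s):
--         if s + amount_check > 15:
--             return False
--         return fits(s, 14 - s, amount_check) or search(s + 1)
--
--     return amount_check >= 1 and search(0)
-- ===== Notes on version B (the rewrite author's own statement) =====
-- stated objective: alternative
-- what changed: Replaces A's single-pass streak-counter scan by a recursive sliding-window search: for each possible start column s it checks (recursively) whether the whole length-amount_check window of diagonal cells is occupied, no run counter is maintained.
import Mathlib
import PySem

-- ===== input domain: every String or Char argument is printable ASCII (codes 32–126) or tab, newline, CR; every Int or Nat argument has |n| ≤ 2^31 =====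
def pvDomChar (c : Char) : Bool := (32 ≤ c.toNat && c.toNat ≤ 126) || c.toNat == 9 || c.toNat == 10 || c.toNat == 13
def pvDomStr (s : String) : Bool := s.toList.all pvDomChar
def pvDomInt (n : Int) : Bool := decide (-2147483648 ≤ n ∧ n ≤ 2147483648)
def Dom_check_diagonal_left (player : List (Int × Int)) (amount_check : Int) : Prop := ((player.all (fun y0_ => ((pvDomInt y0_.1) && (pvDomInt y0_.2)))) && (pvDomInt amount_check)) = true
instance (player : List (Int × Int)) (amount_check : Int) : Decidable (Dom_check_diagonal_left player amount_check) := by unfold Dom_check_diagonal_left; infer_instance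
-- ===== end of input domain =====

-- B replaces A's streak-counter scan by a recursive sliding-window search (try every start column, check the whole window); alternative, similar cost.


-- ===== PORT A =====
-- the while loop: 'fuel' counts the remaining iterations (x_cord goes 0..14, so 15)
def check_diagonal_left_loop (player : List (Int × Int)) (amount_check : Int)
    (x_cord y_cord in_a_row : Int) : Nat → Bool
  | 0 => false
  | n + 1 =>
    if player.contains (x_cord, y_cord) then
      if in_a_row + 1 = amount_check then true
      else check_diagonal_left_loop player amount_check (x_cord + 1) (y_cord - 1) (in_a_row + 1) n
    else check_diagonal_left_loop player amount_check (x_cord + 1) (y_cord - 1) 0 n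

def check_diagonal_left (player : List (Int × Int)) (amount_check : Int) : Bool :=
  check_diagonal_left_loop player amount_check 0 14 0 15

-- ===== PORT B =====
-- Source B's fits(x, y, k): the k diagonal cells starting at (x, y) are all occupied
def fitsB (player : List (Int × Int)) (x y k : Int) : Bool :=
  if k ≤ 0 then true
  else player.contains (x, y) && fitsB player (x + 1) (y - 1) (k - 1)
termination_by k.toNat
decreasing_by simp_wf; omega

-- Source B's search(s); 'fuel' bounds the recursion depth (search is only called with
-- amount_check ≥ 1, so s stops by 15 and 16 steps always suffice)
def searchB (player : List (Int × Int)) (amount_check s : Int) : Nat → Bool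
  | 0 => false
  | f + 1 =>
    if s + amount_check > 15 then false
    else fitsB player s (14 - s) amount_check || searchB player amount_check (s + 1) f

def check_diagonal_left_alt (player : List (Int × Int)) (amount_check : Int) : Bool :=
  decide (amount_check ≥ 1) && searchB player amount_check 0 16

-- ===== PRECONDITION & SPEC =====
def Spec_check_diagonal_left (player : List (Int × Int)) (amount_check : Int) (out : Bool) : Prop := out = check_diagonal_left_alt player amount_check
instance (player : List (Int × Int)) (amount_check : Int) (out : Bool) : Decidable (Spec_check_diagonal_left player amount_check out) := by unfold Spec_check_diagonal_left; infer_instance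

-- ===== CLAIM (what is proved, stated in full; the proofs are below) =====
def Claim_equal_check_diagonal_left : Prop := ∀ (player : List (Int × Int)) (amount_check : Int), Dom_check_diagonal_left player amount_check → Spec_check_diagonal_left player amount_check (check_diagonal_left player amount_check)

-- ===== LEMMAS AND PROOFS =====

-- A's early-return scan abstracted over the boolean list (proof-only helper)
def fARun (ac : Int) : List Bool → Int → Bool
  | [], _ => false
  | b :: bs, r => if b then (if r + 1 = ac then true else fARun ac bs (r + 1)) else fARun ac bs 0

-- the boolean diagonal cells visited by A's loop, starting at (x, y), n remaining steps
def diagBools (player : List (Int × Int)) (x y : Int) : Nat → List Bool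
  | 0 => []
  | n + 1 => player.contains (x, y) :: diagBools player (x + 1) (y - 1) n

-- 'the first n entries of bs exist and are all true' (trivially true for n ≤ 0)
def winAllI (n : Int) : List Bool → Bool
  | [] => decide (n ≤ 0)
  | b :: t => decide (n ≤ 0) || (b && winAllI (n - 1) t)

-- 'some window of n consecutive true entries occurs in bs'
def hasWinI (n : Int) : List Bool → Bool
  | [] => decide (n ≤ 0)
  | b :: t => winAllI n (b :: t) || hasWinI n t

theorem loop_eq_fA (player : List (Int × Int)) (ac : Int) :
    ∀ (n : Nat) (x y r : Int),
      check_diagonal_left_loop player ac x y r n =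
        fARun ac (diagBools player x y n) r := by
  intro n
  induction n with
  | zero => intro x y r; rfl
  | succ n ih =>
    intro x y r
    simp only [check_diagonal_left_loop, diagBools, fARun]
    split_ifs <;> simp [ih]

theorem fA_nonpos (ac : Int) (hac : ac ≤ 0) : ∀ (bs : List Bool) (cur : Int),
    0 ≤ cur → fARun ac bs cur = false := by
  intro bs
  induction bs with
  | nil => intro cur _; rfl
  | cons b bs ih =>
    intro cur hc
    simp only [fARun]
    split_ifs with h1 h2
    · omega
    · exact ih _ (by omega)
    · exact ih _ (by omega)

theorem winAllI_nonpos (n : Int) (hn : n ≤ 0) : ∀ bs, winAllI n bs = true := by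
  intro bs; cases bs <;> simp [winAllI, hn]

theorem winAllI_mono (m n : Int) (h : n ≤ m) : ∀ bs, winAllI m bs = true → winAllI n bs = true := by
  intro bs
  induction bs generalizing m n with
  | nil => simp [winAllI]; omega
  | cons b t ih =>
    simp only [winAllI, Bool.or_eq_true, Bool.and_eq_true, decide_eq_true_eq]
    rintro (hm | ⟨hb, ht⟩)
    · left; omega
    · by_cases hn : n ≤ 0
      · left; exact hn
      · right; exact ⟨hb, ih (m - 1) (n - 1) (by omega) ht⟩

theorem winAllI_imp_hasWinI (n : Int) : ∀ bs, winAllI n bs = true → hasWinI n bs = true := by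
  intro bs h
  cases bs with
  | nil => exact h
  | cons b t => simp [hasWinI, h]

theorem winAllI_long (n : Int) : ∀ bs : List Bool, (bs.length : Int) < n → winAllI n bs = false := by
  intro bs
  induction bs generalizing n with
  | nil => intro h; simp [winAllI]; omega
  | cons b t ih =>
    intro h
    simp only [List.length_cons] at h
    simp only [winAllI, Bool.or_eq_false_iff, Bool.and_eq_false_iff]
    constructor
    · simp; omega
    · right; exact ih (n - 1) (by push_cast at h; omega)

theorem hasWinI_long (n : Int) : ∀ bs : List Bool, (bs.length : Int) < n → hasWinI n bs = false := by
  intro bs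
  induction bs generalizing n with
  | nil => intro h; simp [hasWinI]; omega
  | cons b t ih =>
    intro h
    simp only [List.length_cons] at h
    simp only [hasWinI, Bool.or_eq_false_iff]
    exact ⟨winAllI_long n _ (by simpa using h), ih n (by push_cast at h ⊢; omega)⟩

theorem fA_eq_win (ac : Int) (hac : 1 ≤ ac) :
    ∀ (bs : List Bool) (r : Int), 0 ≤ r → r < ac →
      fARun ac bs r = (winAllI (ac - r) bs || hasWinI ac bs) := by
  intro bs
  induction bs with
  | nil =>
    intro r h0 hr
    simp [fARun, winAllI, hasWinI]; omega
  | cons b t ih =>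
    intro r h0 hr
    cases b with
    | true =>
      simp only [fARun, if_true]
      by_cases h : r + 1 = ac
      · rw [if_pos h]
        have h1 : winAllI (ac - r) (true :: t) = true := by
          simp [winAllI, winAllI_nonpos (ac - r - 1) (by omega)]
        simp [h1]
      · rw [if_neg h, ih (r + 1) (by omega) (by omega)]
        have e1 : winAllI (ac - r) (true :: t) = winAllI (ac - r - 1) t := by
          simp [winAllI]; omega
        have e2 : hasWinI ac (true :: t) = (winAllI (ac - 1) t || hasWinI ac t) := by
          simp only [hasWinI]
          have : winAllI ac (true :: t) = winAllI (ac - 1) t := by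
            simp [winAllI]; omega
          rw [this]
        have eq1 : ac - (r + 1) = ac - r - 1 := by ring
        rw [e1, e2, eq1]
        cases h2 : hasWinI ac t
        · cases h3 : winAllI (ac - 1) t
          · simp
          · have h4 := winAllI_mono (ac - 1) (ac - r - 1) (by omega) t h3
            simp [h4]
        · simp
    | false =>
      simp only [fARun, Bool.false_eq_true, if_false]
      rw [ih 0 le_rfl (by omega)]
      have e1 : winAllI (ac - r) (false :: t) = false := by
        simp [winAllI]; omega
      have e2 : hasWinI ac (false :: t) = hasWinI ac t := by
        simp [hasWinI, winAllI]; omega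
      rw [e1, e2]
      cases h1 : winAllI (ac - 0) t
      · simp
      · have := winAllI_imp_hasWinI ac t (by simpa using h1)
        simp [this]

theorem fits_eq (player : List (Int × Int)) :
    ∀ (n : Nat) (x y k : Int), 0 ≤ k → k ≤ (n : Int) →
      fitsB player x y k = winAllI k (diagBools player x y n) := by
  intro n
  induction n with
  | zero =>
    intro x y k h0 hn
    have hk : k = 0 := by omega
    rw [fitsB]
    simp [hk, diagBools, winAllI]
  | succ n ih =>
    intro x y k h0 hn
    rw [fitsB]
    by_cases hk : k ≤ 0
    · simp [hk, winAllI_nonpos k hk]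
    · rw [if_neg hk]
      simp only [diagBools, winAllI]
      rw [ih (x + 1) (y - 1) (k - 1) (by omega) (by push_cast at hn ⊢; omega)]
      simp; omega

theorem search_eq (player : List (Int × Int)) (ac : Int) (hac : 1 ≤ ac) :
    ∀ (fuel : Nat) (s : Int), 0 ≤ s → 16 ≤ s + (fuel : Int) →
      searchB player ac s fuel = hasWinI ac (diagBools player s (14 - s) (15 - s).toNat) := by
  intro fuel
  induction fuel with
  | zero =>
    intro s h0 hf
    have h1 : (15 - s).toNat = 0 := by omega
    rw [h1]
    simp [searchB, diagBools, hasWinI]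
    omega
  | succ f ih =>
    intro s h0 hf
    simp only [searchB]
    by_cases h : s + ac > 15
    · rw [if_pos h]
      have hlen : ∀ m x y, (diagBools player x y m).length = m := by
        intro m
        induction m with
        | zero => intro x y; rfl
        | succ m ihm => intro x y; simp [diagBools, ihm]
      rw [hasWinI_long]
      rw [hlen]; omega
    · rw [if_neg h]
      have hm : (15 - s).toNat = (14 - s).toNat + 1 := by omega
      rw [hm]
      have hw : fitsB player s (14 - s) ac =
          winAllI ac (diagBools player s (14 - s) ((14 - s).toNat + 1)) :=
        fits_eq player ((14 - s).toNat + 1) s (14 - s) ac (by omega) (by push_cast; omega)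
      simp only [diagBools] at hw
      simp only [diagBools, hasWinI]
      rw [← hw]
      have e5 : (14 : Int) - s - 1 = 14 - (s + 1) := by ring
      have e6 : (14 - s).toNat = (15 - (s + 1)).toNat := by omega
      rw [e5, e6, ih (s + 1) (by omega) (by push_cast at hf ⊢; omega)]

-- ===== VERDICT (by name: the statement is the Claim_ definition above) =====
theorem check_diagonal_left_spec : Claim_equal_check_diagonal_left := by
  intro player ac _
  show check_diagonal_left player ac = check_diagonal_left_alt player ac
  unfold check_diagonal_left check_diagonal_left_alt
  rw [loop_eq_fA]
  by_cases hac : 1 ≤ ac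
  · rw [fA_eq_win ac hac _ 0 le_rfl (by omega)]
    rw [search_eq player ac hac 16 0 le_rfl (by norm_num)]
    simp only [sub_zero]
    have habs : ∀ bs, (winAllI ac bs || hasWinI ac bs) = hasWinI ac bs := by
      intro bs
      cases h1 : winAllI ac bs
      · simp
      · simp [winAllI_imp_hasWinI ac bs h1]
    simp [hac, habs]
  · rw [fA_nonpos ac (by omega) _ 0 le_rfl]
    simp [hac]
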